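-- pv_equiv track=rewrite | github.com/nastya-pa/my_homework | 4.10.21 1.py | da
-- ===== SOURCE A (Python) =====
-- def da(data):
--     b = []
--     processed_data = []
--     for i in range(len(data)):
--         if i not in b:
--             f = data.find(data[i])
--             s = data.rfind(data[i])
--             processed_data.append(data[f:s+1:])
--             b.append(i)
--     processed_data.sort()
--     return processed_data[:1]
-- ===== SOURCE B (Python) =====
-- def da(data):
--     spans = [data[data.find(c):data.rfind(c) + 1] for c in set(data)]
--     return [min(spans)] if spans else []
-- ===== Notes on version B (the rewrite author's own statement) =====
-- stated objective: faster
-- what changed: Instead of building a first-to-last span substring for every index (with an O(n) membership scan of the index list and a find/rfind per position) and sorting the n substrings to take the first, B builds one span per distinct character of the set and returns its minimum.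
import Mathlib
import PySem

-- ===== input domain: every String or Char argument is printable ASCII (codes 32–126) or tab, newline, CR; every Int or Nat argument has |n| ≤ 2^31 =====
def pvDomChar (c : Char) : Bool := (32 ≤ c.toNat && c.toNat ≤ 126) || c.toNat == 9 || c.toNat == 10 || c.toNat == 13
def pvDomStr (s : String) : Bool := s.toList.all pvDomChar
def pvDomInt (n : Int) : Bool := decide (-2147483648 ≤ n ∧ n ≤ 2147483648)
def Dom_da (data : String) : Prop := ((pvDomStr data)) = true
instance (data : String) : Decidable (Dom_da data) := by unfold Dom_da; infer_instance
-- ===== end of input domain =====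

-- B replaces A's per-index span list + full sort + take-first by one span per DISTINCT character
-- and its minimum; measured faster (O(n^2) → O(n·d), d = number of distinct characters).

-- ===== PORT A =====
-- literal transliteration of A: for every index i, if the index is not yet in b, append
-- data[data.find(data[i]) : data.rfind(data[i])+1] and record i; finally sort and take [:1].
def da (data : String) : List String :=
  let cs := data.toList
  let st :=
    (PySem.List.pyRange 0 (PySem.Chars.len cs) 1).foldl
      (fun (st : List Int × List String) i =>
        if i ∈ st.1 then st
        else
          let c := PySem.List.pyGetD cs i ' '   -- data[i]; i is always in range here
          let f := PySem.Chars.find cs [c]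
          let s := PySem.Chars.rfind cs [c]
          (st.1 ++ [i],
           st.2 ++ [String.ofList (PySem.List.slice cs (some f) (some (s + 1)))]))
      ([], [])
  PySem.List.slice (PySem.List.sorted st.2 (fun x => x) false) none (some 1)

-- ===== PORT B =====
-- literal transliteration of B: spans = [data[data.find(c):data.rfind(c)+1] for c in set(data)];
-- return [min(spans)] if spans else []
def da_alt (data : String) : List String :=
  let cs := data.toList
  let spans :=
    (PySem.Set.ofList cs).map
      (fun c =>
        String.ofList (PySem.List.slice cs (some (PySem.Chars.find cs [c]))
          (some (PySem.Chars.rfind cs [c] + 1))))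
  match PySem.List.min? spans (fun x => x) with
  | some m => [m]
  | none => []

-- ===== PRECONDITION & SPEC =====
def Spec_da (data : String) (out : List String) : Prop := out = da_alt data
instance (data : String) (out : List String) : Decidable (Spec_da data out) := by unfold Spec_da; infer_instance

-- ===== CLAIM (what is proved, stated in full; the proofs are below) =====
def Claim_equal_da : Prop := ∀ (data : String), Dom_da data → Spec_da data (da data)

-- ===== LEMMAS AND PROOFS =====

-- the span substring both programs compute for a character c
def pvSpan (cs : List Char) (c : Char) : String :=
  String.ofList (PySem.List.slice cs (some (PySem.Chars.find cs [c]))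
    (some (PySem.Chars.rfind cs [c] + 1)))

theorem pvSpan_def (cs : List Char) (c : Char) :
    String.ofList (PySem.List.slice cs (some (PySem.Chars.find cs [c]))
      (some (PySem.Chars.rfind cs [c] + 1))) = pvSpan cs c := rfl

-- A's membership guard on b never skips: b only ever holds earlier indices
theorem pvLoopA (g : Int → String) :
    ∀ (r b : List Int) (pd : List String), r.Nodup → (∀ j ∈ r, j ∉ b) →
      (r.foldl
        (fun (st : List Int × List String) i =>
          if i ∈ st.1 then st else (st.1 ++ [i], st.2 ++ [g i])) (b, pd)).2
        = pd ++ r.map g := by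
  intro r
  induction r with
  | nil => intro b pd _ _; simp
  | cons i r ih =>
    intro b pd hnd hdisj
    have hi : i ∉ b := hdisj i (by simp)
    simp only [List.foldl_cons, if_neg hi]
    rw [ih (b ++ [i]) (pd ++ [g i]) (List.nodup_cons.mp hnd).2]
    · simp
    · intro j hj
      simp only [List.mem_append, List.mem_singleton]
      push Not
      exact ⟨hdisj j (by simp [hj]), fun h => (List.nodup_cons.mp hnd).1 (h ▸ hj)⟩

-- A's processed list is the span of every character of data, in order
theorem pvA_eq (data : String) :
    da data = PySem.List.slice
      (PySem.List.sorted (data.toList.map (pvSpan data.toList)) (fun x => x) false)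
      none (some 1) := by
  simp only [da, pvSpan_def, PySem.Chars.len_eq]
  rw [pvLoopA (g := fun i => pvSpan data.toList (PySem.List.pyGetD data.toList i ' '))
      _ _ _ (PySem.List.nodup_pyRange_one 0 _) (by simp)]
  rw [List.nil_append]
  have hm := congrArg (List.map (pvSpan data.toList))
    (PySem.List.map_pyGetD_pyRange_zero' (xs := data.toList) (d := ' '))
  rw [List.map_map] at hm
  simp only [Function.comp_def] at hm
  rw [hm]

-- the two span lists have the same members
theorem pvMem_iff (cs : List Char) (y : String) :
    y ∈ cs.map (pvSpan cs) ↔ y ∈ (PySem.Set.ofList cs).map (pvSpan cs) := by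
  simp only [List.mem_map]
  constructor <;> rintro ⟨c, hc, rfl⟩
  · exact ⟨c, (PySem.Set.mem_ofList _ _).mpr hc, rfl⟩
  · exact ⟨c, (PySem.Set.mem_ofList _ _).mp hc, rfl⟩

theorem da_spec_aux (data : String) : da data = da_alt data := by
  rw [pvA_eq]
  simp only [da_alt, pvSpan_def]
  rcases h : PySem.List.min? ((PySem.Set.ofList data.toList).map (pvSpan data.toList))
      (fun x => x) with _ | m
  · -- B empty: the set is empty, so data is empty
    have : (PySem.Set.ofList data.toList).map (pvSpan data.toList) = [] :=
      (PySem.List.min?_eq_none_iff _ _).mp h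
    have hcs : data.toList = [] := by
      cases hc : data.toList with
      | nil => rfl
      | cons c t =>
        exfalso
        have : pvSpan data.toList c ∈ (PySem.Set.ofList data.toList).map (pvSpan data.toList) := by
          exact List.mem_map_of_mem ((PySem.Set.mem_ofList _ _).mpr (by simp [hc]))
        simp_all
    simp [hcs, PySem.List.sorted, PySem.List.slice]
  · -- B nonempty: head of A's sorted list equals B's min
    have hmem : m ∈ (PySem.Set.ofList data.toList).map (pvSpan data.toList) :=
      PySem.List.min?_mem h
    have hmin := PySem.List.min?_isMin h
    -- A's sorted list is nonempty
    cases hs : PySem.List.sorted (data.toList.map (pvSpan data.toList)) (fun x => x) false with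
    | nil =>
      exfalso
      have : data.toList.map (pvSpan data.toList) = [] :=
        (PySem.List.sorted_eq_nil_iff _ _ _).mp hs
      have := (pvMem_iff data.toList m).mpr hmem
      simp_all
    | cons a t =>
      have hale : ∀ y ∈ data.toList.map (pvSpan data.toList), a ≤ y :=
        PySem.List.key_head_sorted_le _ _ hs
      have hamem : a ∈ data.toList.map (pvSpan data.toList) := by
        have := (PySem.List.sorted_perm (data.toList.map (pvSpan data.toList))
          (fun x => x) false).mem_iff (a := a)
        simp [hs] at this
        simpa [List.mem_map] using this
      have h1 : a ≤ m := hale m ((pvMem_iff data.toList m).mpr hmem)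
      have h2 : m ≤ a := hmin a ((pvMem_iff data.toList a).mp hamem)
      have ham : a = m := le_antisymm h1 h2
      rw [ham]
      simp [PySem.List.slice_to]

-- ===== VERDICT (by name: the statement is the Claim_ definition above) =====
theorem da_spec : Claim_equal_da := by
  intro data _
  unfold Spec_da
  exact da_spec_aux data
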